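-- pv_equiv track=rewrite | github.com/spahnrl/prj_BookieX | eng/pipelines/shared/b_gen_001_ingest_schedule.py | _ncaam_dedupe
-- ===== SOURCE A (Python) =====
-- def _ncaam_dedupe(rows: list[dict]) -> list[dict]:
--     by_id = {}
--     for r in rows:
--         k = str(r.get("game_id") or "").strip()
--         if k:
--             by_id[k] = r
--     out = list(by_id.values())
--     out.sort(key=lambda r: (str(r.get("game_date") or ""), str(r.get("away_team_raw") or ""), str(r.get("home_team_raw") or ""), str(r.get("game_id") or "")))
--     return out
-- ===== SOURCE B (Python) =====
-- def _ncaam_dedupe(rows: list[dict]) -> list[dict]: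
--     # Reverse scan with a seen-set: the first row met for a game_id is its LAST
--     # occurrence in rows, so no dict rebuilding is needed; the final sort's keys
--     # are pairwise distinct (distinct stripped game_id => distinct raw game_id),
--     # so the pre-sort order cannot matter.
--     seen = set()
--     out = []
--     for r in reversed(rows):
--         k = str(r.get("game_id") or "").strip()
--         if k and k not in seen:
--             seen.add(k)
--             out.append(r)
--     out.sort(key=lambda r: (str(r.get("game_date") or ""), str(r.get("away_team_raw") or ""), str(r.get("home_team_raw") or ""), str(r.get("game_id") or "")))
--     return out
-- ===== Notes on version B (the rewrite author's own statement) =====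
-- stated objective: alternative
-- what changed: Replaces the forward dict-overwrite dedup (last write per stripped game_id wins, then sort the dict's values) by a single reverse scan with a seen-set that keeps the first row met per stripped game_id (= the last occurrence), relying on the final sort's keys being pairwise distinct so the pre-sort order is irrelevant.
import Mathlib
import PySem

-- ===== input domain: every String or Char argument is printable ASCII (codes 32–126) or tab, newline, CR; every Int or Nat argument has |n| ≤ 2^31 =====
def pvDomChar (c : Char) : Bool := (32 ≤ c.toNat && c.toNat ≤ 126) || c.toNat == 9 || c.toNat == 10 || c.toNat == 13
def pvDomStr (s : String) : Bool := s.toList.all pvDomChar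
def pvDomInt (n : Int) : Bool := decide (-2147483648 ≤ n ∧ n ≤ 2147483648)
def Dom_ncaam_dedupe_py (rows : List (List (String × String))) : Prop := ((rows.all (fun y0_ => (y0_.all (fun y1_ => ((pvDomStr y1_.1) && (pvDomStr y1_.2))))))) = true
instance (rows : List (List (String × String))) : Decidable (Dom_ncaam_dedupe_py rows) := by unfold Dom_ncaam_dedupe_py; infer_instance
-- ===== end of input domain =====

-- B replaces A's forward dict-overwrite dedup by a reverse scan with a seen-set (same cost, no dict);
-- equal because the final sort's keys are pairwise distinct among the surviving rows.

-- helpers shared by both ports (both Python versions contain these identical expressions):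
-- str(r.get(f) or "") — values are strings, so `or ""` only turns a missing key (None) or "" into ""
def pvRowGet (r : List (String × String)) (f : String) : String :=
  PySem.Dict.getD (PySem.Dict.ofList r) f ""

-- k = str(r.get("game_id") or "").strip()
def pvKey (r : List (String × String)) : String := PySem.Str.strip (pvRowGet r "game_id")

-- the 4-tuple sort key; Python's tuple-of-strings comparison is the lexicographic order on
-- the component list, i.e. Mathlib's lexicographic linear order on List String
def pvSortKey (r : List (String × String)) : List String :=
  [pvRowGet r "game_date", pvRowGet r "away_team_raw", pvRowGet r "home_team_raw", pvRowGet r "game_id"]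

-- out.sort(key=lambda r: (...)) (instances written out: the lexicographic linear order on List String)
def pvSortRows (xs : List (List (String × String))) : List (List (String × String)) :=
  @PySem.List.sorted _ _ List.instLinearOrder.toLT LinearOrder.toDecidableLT xs pvSortKey false

-- ===== PORT A =====
-- by_id = {}; for r in rows: k = key(r); if k: by_id[k] = r; out = list(by_id.values()); out.sort(...)
def ncaam_dedupe_py (rows : List (List (String × String))) : List (List (String × String)) :=
  pvSortRows
    (rows.foldl
      (fun d r => if pvKey r ≠ "" then d.insert (pvKey r) r else d)
      (PySem.Dict.empty : PySem.Dict String (List (String × String)))).values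

-- ===== PORT B =====
-- seen = set(); out = []; for r in reversed(rows): k = key(r); if k and k not in seen: seen.add(k); out.append(r); out.sort(...)
def ncaam_dedupe_py_alt (rows : List (List (String × String))) : List (List (String × String)) :=
  pvSortRows
    (rows.reverse.foldl
      (fun (st : PySem.Set String × List (List (String × String))) r =>
        if pvKey r ≠ "" ∧ ¬ PySem.Set.contains st.1 (pvKey r) then
          (PySem.Set.add st.1 (pvKey r), st.2 ++ [r])
        else st)
      ((PySem.Set.empty : PySem.Set String), [])).2

-- ===== PRECONDITION & SPEC =====
def Spec_ncaam_dedupe_py (rows : List (List (String × String))) (out : List (List (String × String))) : Prop := out = ncaam_dedupe_py_alt rows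
instance (rows : List (List (String × String))) (out : List (List (String × String))) : Decidable (Spec_ncaam_dedupe_py rows out) := by unfold Spec_ncaam_dedupe_py; infer_instance

-- ===== CLAIM (what is proved, stated in full; the proofs are below) =====
def Claim_equal_ncaam_dedupe_py : Prop := ∀ (rows : List (List (String × String))), Dom_ncaam_dedupe_py rows → Spec_ncaam_dedupe_py rows (ncaam_dedupe_py rows)

-- ===== LEMMAS AND PROOFS =====

-- the row kept for a stripped game_id k is the LAST row of rows whose stripped id is k,
-- i.e. the first such row of rows.reverse
def pvLast (rows : List (List (String × String))) (k : String) : Option (List (String × String)) :=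
  rows.reverse.find? (fun x => pvKey x == k)

-- A's dict lookup after the fold: last insert wins
theorem pvA_get (l : List (List (String × String))) (d : PySem.Dict String (List (String × String))) (k : String) :
    (l.foldl (fun d r => d.insert (pvKey r) r) d).get? k
      = (l.reverse.find? (fun r => pvKey r == k)).or (d.get? k) := by
  induction l generalizing d with
  | nil => simp
  | cons r0 t ih =>
    simp only [List.foldl_cons, List.reverse_cons, List.find?_append, ih, Option.or_assoc]
    congr 1
    rw [PySem.Dict.get?_insert]
    by_cases h : k = pvKey r0
    · subst h; simp [List.find?]
    · rw [if_neg h]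
      have hb : (pvKey r0 == k) = false := beq_eq_false_iff_ne.mpr (fun e => h e.symm)
      simp [List.find?, hb]

-- proof-side names for the two folds (definitionally the ports' loops)
def pvAD (rows : List (List (String × String))) : PySem.Dict String (List (String × String)) :=
  rows.foldl (fun d r => if pvKey r ≠ "" then d.insert (pvKey r) r else d) PySem.Dict.empty

def pvBStep (st : PySem.Set String × List (List (String × String))) (r : List (String × String)) :
    PySem.Set String × List (List (String × String)) :=
  if pvKey r ≠ "" ∧ ¬ PySem.Set.contains st.1 (pvKey r) then
    (PySem.Set.add st.1 (pvKey r), st.2 ++ [r])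
  else st

def pvBGo (l : List (List (String × String))) (st : PySem.Set String × List (List (String × String))) :
    PySem.Set String × List (List (String × String)) := l.foldl pvBStep st

-- dropping the rows with empty stripped id does not change which row is found for a key k ≠ ""
theorem pvFind_filter (l : List (List (String × String))) (k : String) (hk : k ≠ "") :
    (l.filter (fun r => decide (pvKey r ≠ ""))).find? (fun r => pvKey r == k)
      = l.find? (fun r => pvKey r == k) := by
  induction l with
  | nil => rfl
  | cons r t ih =>
    by_cases h : pvKey r ≠ ""
    · have hfc : (r :: t).filter (fun r => decide (pvKey r ≠ ""))
          = r :: t.filter (fun r => decide (pvKey r ≠ "")) := by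
        rw [List.filter_cons, if_pos (by simpa using h)]
      rw [hfc]
      by_cases hp : pvKey r = k
      · have hb : ((fun r => pvKey r == k) r) = true := by simpa using hp
        rw [List.find?_cons_of_pos (p := fun r => pvKey r == k) hb,
            List.find?_cons_of_pos (p := fun r => pvKey r == k) hb]
      · have hb : ¬ ((fun r => pvKey r == k) r = true) := by simpa using hp
        rw [List.find?_cons_of_neg (p := fun r => pvKey r == k) hb,
            List.find?_cons_of_neg (p := fun r => pvKey r == k) hb, ih]
    · have he : pvKey r = "" := not_not.mp h
      have hfc : (r :: t).filter (fun r => decide (pvKey r ≠ ""))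
          = t.filter (fun r => decide (pvKey r ≠ "")) := by
        rw [List.filter_cons, if_neg (by simpa using h)]
      have hb : ¬ ((fun r => pvKey r == k) r = true) := by
        simpa using (by rw [he]; exact fun e => hk e.symm : pvKey r ≠ k)
      rw [hfc, List.find?_cons_of_neg (p := fun r => pvKey r == k) hb]
      exact ih

theorem pvAD_get (rows : List (List (String × String))) (k : String) :
    (pvAD rows).get? k = if k = "" then none else pvLast rows k := by
  unfold pvAD
  rw [PySem.List.foldl_ite_eq_foldl_filter, pvA_get]
  simp only [PySem.Dict.get?_empty, Option.or_none]
  rw [← List.filter_reverse]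
  by_cases hk : k = ""
  · rw [if_pos hk, List.find?_eq_none]
    intro x hx
    have : pvKey x ≠ "" := by simpa using (List.of_mem_filter hx)
    simpa [hk] using fun e : (pvKey x == k) = true => this (hk ▸ beq_iff_eq.mp e)
  · rw [if_neg hk]
    exact pvFind_filter rows.reverse k hk

theorem pvAD_nodup (rows : List (List (String × String))) : (pvAD rows).keys.Nodup := by
  unfold pvAD
  rw [PySem.List.foldl_ite_eq_foldl_filter]
  exact PySem.Dict.nodup_keys_foldl_insert_key _ pvKey (fun _ r => r) _ PySem.Dict.nodup_keys_empty

-- every key of A's dict names its row: pvKey (value stored at k) = k, and k ≠ ""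
theorem pvAD_key_of_mem (rows : List (List (String × String))) (k : String)
    (hk : k ∈ (pvAD rows).keys) :
    pvKey ((pvAD rows).getD k []) = k ∧ k ≠ "" ∧ (pvAD rows).get? k = some ((pvAD rows).getD k []) := by
  have hc : (pvAD rows).contains k = true := (PySem.Dict.contains_iff_mem_keys _ _).mpr hk
  obtain ⟨v, hv⟩ : ∃ v, (pvAD rows).get? k = some v := by
    rw [PySem.Dict.contains_eq_isSome_get?] at hc
    exact Option.isSome_iff_exists.mp hc
  have hne : k ≠ "" := by
    intro he; rw [pvAD_get, if_pos he] at hv; simp at hv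
  have hfind : rows.reverse.find? (fun x => pvKey x == k) = some v := by
    rw [pvAD_get, if_neg hne] at hv; exact hv
  have hkey : pvKey v = k := by simpa using List.find?_some (p := fun x => pvKey x == k) hfind
  have hgd : (pvAD rows).getD k [] = v := PySem.Dict.getD_of_get?_eq_some _ [] hv
  exact ⟨by rw [hgd, hkey], hne, by rw [hgd]; exact hv⟩

theorem pvA_mem (rows : List (List (String × String))) (r : List (String × String)) :
    r ∈ (pvAD rows).values ↔ (pvKey r ≠ "" ∧ pvLast rows (pvKey r) = some r) := by
  constructor
  · intro hr
    rw [PySem.Dict.values_eq_map_keys _ (pvAD_nodup rows) []] at hr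
    obtain ⟨k, hk, hgd⟩ := List.mem_map.mp hr
    obtain ⟨hkey, hne, hget⟩ := pvAD_key_of_mem rows k hk
    have hkr : pvKey r = k := by rw [← hgd]; exact hkey
    refine ⟨hkr ▸ hne, ?_⟩
    have := pvAD_get rows k
    rw [if_neg hne, hget, hgd] at this
    rw [hkr]; exact this.symm
  · rintro ⟨h1, h2⟩
    have hget : (pvAD rows).get? (pvKey r) = some r := by
      rw [pvAD_get, if_neg h1]; exact h2
    have : (pvKey r, r) ∈ (pvAD rows).items := PySem.Dict.mem_items_of_get?_eq_some _ hget
    exact List.mem_map.mpr ⟨(pvKey r, r), this, rfl⟩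

theorem pvA_pairwise (rows : List (List (String × String))) :
    (pvAD rows).values.Pairwise (fun a b => pvKey a ≠ pvKey b) := by
  rw [PySem.Dict.values_eq_map_keys _ (pvAD_nodup rows) []]
  rw [List.pairwise_map]
  refine (pvAD_nodup rows).imp_of_mem ?_
  intro k1 k2 h1 h2 hne
  rw [(pvAD_key_of_mem rows k1 h1).1, (pvAD_key_of_mem rows k2 h2).1]
  exact hne

-- B's loop invariant: membership and key-distinctness of the output list
set_option maxHeartbeats 1000000 in
theorem pvB_go_spec (l : List (List (String × String))) :
    ∀ (s : PySem.Set String) (acc : List (List (String × String))),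
    (∀ r ∈ acc, pvKey r ∈ s) → acc.Pairwise (fun a b => pvKey a ≠ pvKey b) →
    ((∀ r, r ∈ (pvBGo l (s, acc)).2 ↔
        (r ∈ acc ∨ (pvKey r ≠ "" ∧ pvKey r ∉ s ∧ l.find? (fun x => pvKey x == pvKey r) = some r)))
     ∧ (pvBGo l (s, acc)).2.Pairwise (fun a b => pvKey a ≠ pvKey b)) := by
  induction l with
  | nil =>
    intro s acc hsub hpw
    refine ⟨fun r => ?_, hpw⟩
    simp [pvBGo]
  | cons r0 t ih =>
    intro s acc hsub hpw
    have hgo : pvBGo (r0 :: t) (s, acc) = pvBGo t (pvBStep (s, acc) r0) := rfl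
    by_cases hc : pvKey r0 ≠ "" ∧ ¬ PySem.Set.contains s (pvKey r0)
    · have hks : pvKey r0 ∉ s := fun hm => hc.2 (by simpa using (PySem.Set.contains_iff s (pvKey r0)).mpr hm)
      have hstep : pvBStep (s, acc) r0 = (PySem.Set.add s (pvKey r0), acc ++ [r0]) := by
        simp only [pvBStep]; rw [if_pos hc]
      have hsub' : ∀ r ∈ acc ++ [r0], pvKey r ∈ PySem.Set.add s (pvKey r0) := by
        intro r hr
        rcases List.mem_append.mp hr with h | h
        · exact (PySem.Set.mem_add _ _ _).mpr (Or.inl (hsub r h))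
        · have : r = r0 := by simpa using h
          exact (PySem.Set.mem_add _ _ _).mpr (Or.inr (by rw [this]))
      have hpw' : (acc ++ [r0]).Pairwise (fun a b => pvKey a ≠ pvKey b) := by
        rw [List.pairwise_append]
        refine ⟨hpw, List.pairwise_singleton _ _, ?_⟩
        intro a ha b hb
        have hb' : b = r0 := by simpa using hb
        rw [hb']
        exact fun he => hks (by rw [← he]; exact hsub a ha)
      obtain ⟨ihm, ihpw⟩ := ih (PySem.Set.add s (pvKey r0)) (acc ++ [r0]) hsub' hpw'
      rw [hgo, hstep]
      refine ⟨fun r => ?_, ihpw⟩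
      rw [ihm r]
      by_cases hkr : pvKey r = pvKey r0
      · have hf : (r0 :: t).find? (fun x => pvKey x == pvKey r) = some r0 :=
          List.find?_cons_of_pos (p := fun x => pvKey x == pvKey r) (by simpa using hkr.symm)
        rw [hf]
        constructor
        · intro h
          rcases h with h | ⟨h1, h2, h3⟩
          · rcases List.mem_append.mp h with h | h
            · exact Or.inl h
            · have hr0 : r = r0 := by simpa using h
              exact Or.inr ⟨by rw [hkr]; exact hc.1, by rw [hkr]; exact hks, by rw [hr0]⟩
          · exact absurd ((PySem.Set.mem_add _ _ _).mpr (Or.inr hkr)) h2  -- pvKey r ∈ add s (pvKey r0)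
        · intro h
          rcases h with h | ⟨h1, h2, h3⟩
          · exact Or.inl (List.mem_append.mpr (Or.inl h))
          · have hr0 : r0 = r := Option.some.inj h3
            exact Or.inl (List.mem_append.mpr (Or.inr (by rw [hr0]; simp)))
      · have hb : ¬ ((fun x => pvKey x == pvKey r) r0 = true) := by
          simpa using (fun e : pvKey r0 = pvKey r => hkr e.symm)
        rw [List.find?_cons_of_neg (p := fun x => pvKey x == pvKey r) hb]
        have hmem : r ∈ acc ++ [r0] ↔ r ∈ acc := by
          constructor
          · intro h
            rcases List.mem_append.mp h with h | h
            · exact h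
            · exact absurd (congrArg pvKey (by simpa using h)) hkr
          · exact fun h => List.mem_append.mpr (Or.inl h)
        have hadd : pvKey r ∉ PySem.Set.add s (pvKey r0) ↔ pvKey r ∉ s := by
          rw [not_iff_not]
          rw [PySem.Set.mem_add]
          exact ⟨fun h => h.resolve_right hkr, Or.inl⟩
        rw [hmem, hadd]
    · have hstep : pvBStep (s, acc) r0 = (s, acc) := by
        simp only [pvBStep]; rw [if_neg hc]
      have hfail : pvKey r0 = "" ∨ pvKey r0 ∈ s := by
        by_cases h1 : pvKey r0 = ""
        · exact Or.inl h1
        · refine Or.inr ?_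
          have h2 := (not_and_or.mp hc).resolve_left (fun h => h h1)
          have h3 : PySem.Set.contains s (pvKey r0) = true := by
            by_cases hb : PySem.Set.contains s (pvKey r0) = true
            · exact hb
            · exact absurd (by simpa using hb) h2
          exact (PySem.Set.contains_iff s (pvKey r0)).mp h3
      obtain ⟨ihm, ihpw⟩ := ih s acc hsub hpw
      rw [hgo, hstep]
      refine ⟨fun r => ?_, ihpw⟩
      rw [ihm r]
      by_cases hkr : pvKey r = pvKey r0
      · have hf : (r0 :: t).find? (fun x => pvKey x == pvKey r) = some r0 :=
          List.find?_cons_of_pos (beq_iff_eq.mpr hkr.symm)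
        rw [hf]
        have hdead : ∀ (o : Option _), ¬ (pvKey r ≠ "" ∧ pvKey r ∉ s ∧ o = some r) := by
          rintro o ⟨h1, h2, _⟩
          rcases hfail with h | h
          · exact h1 (by rw [hkr]; exact h)
          · exact h2 (by rw [hkr]; exact h)
        constructor
        · intro h
          exact Or.inl (h.resolve_right (hdead _))
        · intro h
          exact Or.inl (h.resolve_right (hdead _))
      · have hb : ¬ ((fun x => pvKey x == pvKey r) r0 = true) := by
          simpa using (fun e : pvKey r0 = pvKey r => hkr e.symm)
        rw [List.find?_cons_of_neg (p := fun x => pvKey x == pvKey r) hb]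

-- B's surviving rows, named
def pvB (rows : List (List (String × String))) : List (List (String × String)) :=
  (pvBGo rows.reverse (PySem.Set.empty, [])).2

theorem pvB_mem (rows : List (List (String × String))) (r : List (String × String)) :
    r ∈ pvB rows ↔ (pvKey r ≠ "" ∧ pvLast rows (pvKey r) = some r) := by
  have h := (pvB_go_spec rows.reverse PySem.Set.empty [] (by intro r hr; cases hr) List.Pairwise.nil).1 r
  unfold pvB pvLast
  rw [h]
  simp [PySem.Set.empty]

theorem pvB_pairwise (rows : List (List (String × String))) :
    (pvB rows).Pairwise (fun a b => pvKey a ≠ pvKey b) := by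
  exact (pvB_go_spec rows.reverse PySem.Set.empty [] (by intro r hr; cases hr) List.Pairwise.nil).2

-- facts about the shared final sort (instances spelled out once here)
theorem pvSortRows_perm (xs : List (List (String × String))) : (pvSortRows xs).Perm xs := by
  unfold pvSortRows
  exact @PySem.List.sorted_perm _ _ List.instLinearOrder.toLT LinearOrder.toDecidableLT xs pvSortKey false

theorem pvSortRows_pairwise (xs : List (List (String × String))) :
    (pvSortRows xs).Pairwise (fun a b => pvSortKey a ≤ pvSortKey b) := by
  unfold pvSortRows
  exact PySem.List.sorted_pairwise xs pvSortKey

theorem pvSortRows_eq_of (xs ys : List (List (String × String)))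
    (hperm : ys.Perm xs) (hlt : ys.Pairwise (fun a b => pvSortKey a < pvSortKey b)) :
    pvSortRows xs = ys := by
  unfold pvSortRows
  exact PySem.List.sorted_eq_of_perm_of_pairwise_lt xs ys pvSortKey hperm hlt

-- equal sort keys force equal dedup keys (the 4th component is the raw game_id)
theorem pvSortKey_ne (a b : List (String × String)) (h : pvKey a ≠ pvKey b) :
    pvSortKey a ≠ pvSortKey b := by
  intro he
  have h4 : pvRowGet a "game_id" = pvRowGet b "game_id" := by
    have := he
    simp only [pvSortKey, List.cons.injEq, and_true] at this
    exact this.2.2.2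
  exact h (by unfold pvKey; rw [h4])

theorem pv_main (rows : List (List (String × String))) :
    ncaam_dedupe_py rows = ncaam_dedupe_py_alt rows := by
  show pvSortRows (pvAD rows).values = pvSortRows (pvB rows)
  have keyNe : Symmetric (fun a b : List (String × String) => pvKey a ≠ pvKey b) :=
    fun _ _ h => fun e => h e.symm
  have nodA : (pvAD rows).values.Nodup :=
    (pvA_pairwise rows).imp (fun h => fun he => h (he ▸ rfl))
  have nodB : (pvB rows).Nodup :=
    (pvB_pairwise rows).imp (fun h => fun he => h (he ▸ rfl))
  have hperm : (pvAD rows).values.Perm (pvB rows) :=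
    (List.perm_ext_iff_of_nodup nodA nodB).mpr
      (fun r => (pvA_mem rows r).trans (pvB_mem rows r).symm)
  have hperm2 : (pvSortRows (pvAD rows).values).Perm (pvB rows) :=
    (pvSortRows_perm _).trans hperm
  have hne : (pvSortRows (pvAD rows).values).Pairwise (fun a b => pvSortKey a ≠ pvSortKey b) := by
    have h1 : (pvSortRows (pvAD rows).values).Pairwise (fun a b => pvKey a ≠ pvKey b) :=
      ((pvSortRows_perm (pvAD rows).values).pairwise_iff @keyNe).mpr (pvA_pairwise rows)
    exact h1.imp (fun h => pvSortKey_ne _ _ h)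
  have hlt : (pvSortRows (pvAD rows).values).Pairwise (fun a b => pvSortKey a < pvSortKey b) :=
    ((pvSortRows_pairwise _).and hne).imp (fun h => lt_of_le_of_ne h.1 h.2)
  exact (pvSortRows_eq_of (pvB rows) (pvSortRows (pvAD rows).values) hperm2 hlt).symm

-- ===== VERDICT (by name: the statement is the Claim_ definition above) =====
theorem ncaam_dedupe_py_spec : Claim_equal_ncaam_dedupe_py := by
  intro rows _
  exact pv_main rows
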